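-- pv_equiv track=rewrite | github.com/mcaptain79/theory-of-machines-and-languages-project | programmingAssignmentPDA.py | NPDA
-- ===== SOURCE A (Python) =====
-- def NPDA(myStr):
--     n = len(myStr)
--     for i in range(1,n):
--         str1 = myStr[:i]
--         str2 = myStr[i:]
--         if str1 == str2[::-1]:
--             return True
--     return False
-- ===== SOURCE B (Python) =====
-- def NPDA(myStr):
--     # B: two-pointer-style check: nonempty even length, and each character in
--     # the first half matches its mirror in the second half.
--     n = len(myStr)
--     if n == 0 or n % 2 != 0:
--         return False
--     return all(myStr[i] == myStr[n - 1 - i] for i in range(n // 2))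
-- ===== Notes on version B (the rewrite author's own statement) =====
-- stated objective: simpler
-- what changed: Replaced the loop over all split points (each building two slices and reversing one) by an even-length guard plus a mirror-index scan comparing myStr[i] with myStr[n-1-i] over the first half, since only the midpoint split can ever match.
import Mathlib
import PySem

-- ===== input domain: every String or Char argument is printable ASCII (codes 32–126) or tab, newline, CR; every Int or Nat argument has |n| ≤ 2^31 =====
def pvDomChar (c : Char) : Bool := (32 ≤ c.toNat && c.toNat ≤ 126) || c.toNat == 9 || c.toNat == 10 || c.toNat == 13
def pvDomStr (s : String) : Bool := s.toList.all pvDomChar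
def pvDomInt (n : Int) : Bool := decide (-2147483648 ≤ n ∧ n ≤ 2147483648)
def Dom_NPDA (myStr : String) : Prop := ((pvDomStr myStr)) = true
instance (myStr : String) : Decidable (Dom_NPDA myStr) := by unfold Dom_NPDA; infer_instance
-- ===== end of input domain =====

-- B replaces A's scan over every split point (slice + reverse per cut) by an
-- even-length guard plus a mirror-index scan over the first half; values agree everywhere.

-- ===== PORT A =====
-- A: try every split point i in range(1, n); return True on the first i with
-- myStr[:i] == myStr[i:][::-1] (early return ported as List.any over the range).
def NPDA (myStr : String) : Bool :=
  let l := myStr.toList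
  let n : Int := (l.length : Int)
  (PySem.List.pyRange 1 n 1).any (fun i =>
    let str1 := PySem.List.slice l none (some i)
    let str2 := PySem.List.slice l (some i) none
    str1 == ((PySem.List.slice? str2 none none (-1)).getD []))

-- ===== PORT B =====
-- B: if n == 0 or n odd then False, else every i < n//2 has myStr[i] == myStr[n-1-i]
def NPDA_alt (myStr : String) : Bool :=
  let l := myStr.toList
  let n := l.length
  if n == 0 || n % 2 != 0 then false
  else (List.range (n / 2)).all (fun i =>
    PySem.List.pyGet? l (i : Int) == PySem.List.pyGet? l (((n - 1 - i : Nat) : Int)))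

-- ===== PRECONDITION & SPEC =====
def Spec_NPDA (myStr : String) (out : Bool) : Prop := out = NPDA_alt myStr
instance (myStr : String) (out : Bool) : Decidable (Spec_NPDA myStr out) := by unfold Spec_NPDA; infer_instance

-- ===== CLAIM =====
def Claim_equal_NPDA : Prop := ∀ (myStr : String), Dom_NPDA myStr → Spec_NPDA myStr (NPDA myStr)

-- ===== LEMMAS AND PROOFS =====

-- a half-vs-reversed-half match at cut k forces the midpoint and is exactly
-- the even-length palindrome condition
theorem pv_key (l : List Char) (k : Nat) (hk : k ≤ l.length) :
    l.take k = (l.drop k).reverse ↔ (2 * k = l.length ∧ l.reverse = l) := by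
  constructor
  · intro h
    have hlen : k = l.length - k := by
      have := congrArg List.length h
      simp at this
      omega
    have h2 : 2 * k = l.length := by omega
    refine ⟨h2, ?_⟩
    conv_lhs => rw [← List.take_append_drop k l]
    rw [List.reverse_append, h, List.reverse_reverse, ← h]
    exact (List.take_append_drop k l)
  · rintro ⟨h2, hpal⟩
    rw [List.reverse_drop, hpal]
    have : l.length - k = k := by omega
    rw [this]

-- A's loop equals: nonempty ∧ even length ∧ l is a palindrome
theorem pv_A (l : List Char) :
    ((PySem.List.pyRange 1 (l.length : Int) 1).any (fun i =>
      PySem.List.slice l none (some i) ==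
        ((PySem.List.slice? (PySem.List.slice l (some i) none) none none (-1)).getD []))) = true
    ↔ (l.length ≠ 0 ∧ l.length % 2 = 0 ∧ l.reverse = l) := by
  simp only [PySem.List.slice?_none_none_neg_one, Option.getD_some]
  constructor
  · rw [List.any_eq_true]
    rintro ⟨i, hi, hcontra⟩
    rw [PySem.List.mem_pyRange_one] at hi
    obtain ⟨h1, h2⟩ := hi
    have h0 : (0:Int) ≤ i := by omega
    rw [PySem.List.slice_to l h0, PySem.List.slice_from l h0] at hcontra
    rw [beq_iff_eq] at hcontra
    rw [pv_key l i.toNat (by omega)] at hcontra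
    obtain ⟨h2k, hpal⟩ := hcontra
    exact ⟨by omega, by omega, hpal⟩
  · rintro ⟨hne, hmod, hpal⟩
    rw [List.any_eq_true]
    refine ⟨(l.length / 2 : Nat), ?_, ?_⟩
    · rw [PySem.List.mem_pyRange_one]
      constructor
      · have : 1 ≤ l.length / 2 := by omega
        exact_mod_cast this
      · have : l.length / 2 < l.length := by omega
        exact_mod_cast this
    · have h0 : (0:Int) ≤ ((l.length / 2 : Nat) : Int) := by positivity
      rw [PySem.List.slice_to l h0, PySem.List.slice_from l h0]
      simp only [Int.toNat_natCast, beq_iff_eq]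
      rw [pv_key l (l.length / 2) (by omega)]
      exact ⟨by omega, hpal⟩

-- the mirror-index scan over the first half decides the palindrome property
theorem pv_B (l : List Char) :
    ((List.range (l.length / 2)).all (fun i =>
      PySem.List.pyGet? l (i : Int) == PySem.List.pyGet? l (((l.length - 1 - i : Nat) : Int)))) = true
    ↔ l.reverse = l := by
  simp only [PySem.List.pyGet?_natCast]
  rw [List.all_eq_true]
  constructor
  · intro hall
    apply List.ext_getElem (by simp)
    intro i h1 h2
    have hlen : l.reverse.length = l.length := by simp
    by_cases hhalf : i < l.length / 2
    · have := hall i (List.mem_range.mpr hhalf)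
      simp only [beq_iff_eq] at this
      have hr : l.reverse[i]? = l[l.length - 1 - i]? := List.getElem?_reverse h2
      have : l.reverse[i]? = l[i]? := by rw [hr, this]
      simpa [List.getElem?_eq_getElem, h1, h2] using this
    · by_cases hmid : l.length - 1 - i < l.length / 2
      · have := hall (l.length - 1 - i) (List.mem_range.mpr hmid)
        simp only [beq_iff_eq] at this
        have hj : l.length - 1 - (l.length - 1 - i) = i := by omega
        rw [hj] at this
        have hr : l.reverse[i]? = l[l.length - 1 - i]? := List.getElem?_reverse h2
        have : l.reverse[i]? = l[i]? := by rw [hr, ← this]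
        simpa [List.getElem?_eq_getElem, h1, h2] using this
      · -- middle element of an odd-length list: i = l.length - 1 - i
        have hi_eq : l.length - 1 - i = i := by omega
        have hr : l.reverse[i]? = l[l.length - 1 - i]? := List.getElem?_reverse h2
        rw [hi_eq] at hr
        simpa [List.getElem?_eq_getElem, h1, h2] using hr
  · intro hp i hi
    have hhalf := List.mem_range.mp hi
    have hlt : i < l.length := by omega
    have : l.reverse[i]? = l[i]? := by rw [hp]
    rw [List.getElem?_reverse hlt] at this
    rw [← this, beq_self_eq_true]

-- ===== VERDICT =====
theorem NPDA_spec : Claim_equal_NPDA := by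
  intro myStr _
  unfold Spec_NPDA
  rw [Bool.eq_iff_iff]
  simp only [NPDA, NPDA_alt]
  rw [pv_A myStr.toList]
  set l := myStr.toList
  split_ifs with hg
  · simp only [Bool.or_eq_true, beq_iff_eq, bne_iff_ne, ne_eq] at hg
    simp only [iff_false]
    rintro ⟨hne, hmod, -⟩
    omega
  · simp only [Bool.or_eq_true, beq_iff_eq, bne_iff_ne, ne_eq, not_or, not_not] at hg
    rw [pv_B l]
    exact ⟨fun h => h.2.2, fun h => ⟨hg.1, hg.2, h⟩⟩
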